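-- pv_equiv track=rewrite | github.com/henrylwong/leetcode-problems | easy/2570_merge-two-2d-arrays-by-summing-values.py | mergeArrays
-- ===== SOURCE A (Python) =====
-- from typing import List
--
-- def mergeArrays(nums1: List[List[int]], nums2: List[List[int]]) -> List[List[int]]:
--     idx1, idx2 = 0, 0
--     res = list()
--
--     while idx1 < len(nums1) and idx2 < len(nums2):
--         if idx1 < len(nums1) and nums1[idx1][0] <= nums2[idx2][0]:
--             if len(res) and res[-1][0] == nums1[idx1][0]:
--                 res[-1][1] += nums1[idx1][1]
--             else:
--                 res.append(nums1[idx1])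
--             idx1 += 1
--         else:
--             if len(res) and res[-1][0] == nums2[idx2][0]:
--                 res[-1][1] += nums2[idx2][1]
--             else:
--                 res.append(nums2[idx2])
--             idx2 += 1
--
--     if idx2 >= len(nums2):
--         while idx1 < len(nums1):
--             if len(res) and res[-1][0] == nums1[idx1][0]:
--                 res[-1][1] += nums1[idx1][1]
--             else:
--                 res.append(nums1[idx1])
--             idx1 += 1
--     else:
--         while idx2 < len(nums2):
--             if len(res) and res[-1][0] == nums2[idx2][0]:
--                 res[-1][1] += nums2[idx2][1]
--             else:
--                 res.append(nums2[idx2])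
--             idx2 += 1
--
--     return res
-- ===== SOURCE B (Python) =====
-- from typing import List
--
-- def mergeArrays(nums1: List[List[int]], nums2: List[List[int]]) -> List[List[int]]:
--     # Phase 1: plain interleaving merge by current heads (no collapsing yet).
--     merged = []
--     i = j = 0
--     while i < len(nums1) and j < len(nums2):
--         if nums1[i][0] <= nums2[j][0]:
--             merged.append(nums1[i])
--             i += 1
--         else:
--             merged.append(nums2[j])
--             j += 1
--     merged.extend(nums1[i:])
--     merged.extend(nums2[j:])
--
--     # Phase 2: collapse each run of equal adjacent ids, summing the values.
--     res = []
--     k = 0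
--     while k < len(merged):
--         first = merged[k]
--         total = first[1]
--         k += 1
--         while k < len(merged) and merged[k][0] == first[0]:
--             total += merged[k][1]
--             k += 1
--         res.append([first[0], total] + first[2:])
--     return res
-- ===== Notes on version B (the rewrite author's own statement) =====
-- stated objective: simpler
-- what changed: A fuses merging and collapsing in three loops that each back-patch res[-1][1] in place (mutating the input's inner lists); B separates the work into a plain interleaving merge pass followed by a run-grouping pass that sums each run of equal adjacent ids and builds fresh [id,total] lists.
-- outside the precondition, e.g. on mergeArrays([[]], []): A returns [[]], B raises IndexError; on mergeArrays([[1]], []): A returns [[1]], B raises IndexError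
import Mathlib
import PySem

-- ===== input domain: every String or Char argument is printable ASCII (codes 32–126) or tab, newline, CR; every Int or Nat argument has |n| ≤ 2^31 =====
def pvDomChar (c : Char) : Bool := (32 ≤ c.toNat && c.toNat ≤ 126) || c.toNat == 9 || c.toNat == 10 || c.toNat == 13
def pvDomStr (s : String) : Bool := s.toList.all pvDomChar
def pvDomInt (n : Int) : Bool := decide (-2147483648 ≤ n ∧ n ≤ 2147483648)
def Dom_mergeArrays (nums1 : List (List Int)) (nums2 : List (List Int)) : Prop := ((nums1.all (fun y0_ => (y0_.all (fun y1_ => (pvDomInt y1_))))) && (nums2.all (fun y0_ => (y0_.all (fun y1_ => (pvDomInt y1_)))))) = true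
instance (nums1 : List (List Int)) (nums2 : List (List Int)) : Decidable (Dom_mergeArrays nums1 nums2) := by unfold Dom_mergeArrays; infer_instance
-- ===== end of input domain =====

-- B replaces A's fused three-loop merge-with-back-patching by two separate passes (plain merge,
-- then run-grouping sum), for simplicity; equivalence is about the RETURN value only — A mutates
-- the inputs' inner lists in place, B builds fresh lists.
-- Under Pre_ every inner list has length ≥ 2, so the List.getD accesses below are exactly
-- Python's l[0] / l[1] (in range, never the default).

-- ===== PORT A =====
-- A repeats the same 5-line 'collapse into res[-1] or append' block verbatim in its three loops;
-- the port factors that verbatim block as pvPushA, used at the same three places.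
def pvAddSnd (l : List Int) (v : Int) : List Int :=
  match l with
  | a :: b :: t => a :: (b + v) :: t
  | l => l  -- unreachable under Pre_ (res[-1] always has length ≥ 2 there)

def pvPushA (res : List (List Int)) (cur : List Int) : List (List Int) :=
  if res ≠ [] ∧ (res.getLast?.getD []).getD 0 0 = cur.getD 0 0 then
    res.dropLast ++ [pvAddSnd (res.getLast?.getD []) (cur.getD 1 0)]
  else
    res ++ [cur]

def pvDrainA (res : List (List Int)) : List (List Int) → List (List Int)
  | [] => res
  | x :: t => pvDrainA (pvPushA res x) t

def pvMergeLoopA : List (List Int) → List (List Int) → List (List Int) → List (List Int)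
  | res, x :: a, y :: b =>
      if x.getD 0 0 ≤ y.getD 0 0 then pvMergeLoopA (pvPushA res x) a (y :: b)
      else pvMergeLoopA (pvPushA res y) (x :: a) b
  | res, a, b => if b = [] then pvDrainA res a else pvDrainA res b
  termination_by _ a b => a.length + b.length

def mergeArrays (nums1 : List (List Int)) (nums2 : List (List Int)) : List (List Int) :=
  pvMergeLoopA [] nums1 nums2

-- ===== PORT B =====
def pvMergeB : List (List Int) → List (List Int) → List (List Int)
  | x :: a, y :: b =>
      if x.getD 0 0 ≤ y.getD 0 0 then x :: pvMergeB a (y :: b) else y :: pvMergeB (x :: a) b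
  | a, b => a ++ b
  termination_by a b => a.length + b.length

-- the inner while loop of B's second phase: sum the rest of the run of id0, return the remainder
def pvRunB (id0 : Int) (total : Int) : List (List Int) → Int × List (List Int)
  | m :: t => if m.getD 0 0 = id0 then pvRunB id0 (total + m.getD 1 0) t else (total, m :: t)
  | [] => (total, [])

theorem pvRunB_snd_le (id0 total : Int) (xs : List (List Int)) :
    (pvRunB id0 total xs).2.length ≤ xs.length := by
  induction xs generalizing total with
  | nil => simp [pvRunB]
  | cons m t ih =>
      simp only [pvRunB]
      split
      · exact Nat.le_succ_of_le (ih _)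
      · simp

def pvCollapseB : List (List Int) → List (List Int)
  | [] => []
  | e :: t =>
      ([e.getD 0 0, (pvRunB (e.getD 0 0) (e.getD 1 0) t).1] ++ e.drop 2)
        :: pvCollapseB (pvRunB (e.getD 0 0) (e.getD 1 0) t).2
  termination_by xs => xs.length
  decreasing_by exact Nat.lt_succ_of_le (pvRunB_snd_le _ _ _)

def mergeArrays_alt (nums1 : List (List Int)) (nums2 : List (List Int)) : List (List Int) :=
  pvCollapseB (pvMergeB nums1 nums2)

-- ===== PRECONDITION & SPEC =====
-- Pre_ restricts to the task's natural domain of [id, value] rows (inner lists of length ≥ 2);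
-- on shorter rows A usually raises IndexError, and the few values it does return there (e.g. a
-- lone [id] or [] passed through) are accidents of short-circuit evaluation; B raises IndexError.
def Pre_mergeArrays (nums1 : List (List Int)) (nums2 : List (List Int)) : Prop :=
  (∀ l ∈ nums1, 2 ≤ l.length) ∧ (∀ l ∈ nums2, 2 ≤ l.length)
instance (nums1 : List (List Int)) (nums2 : List (List Int)) : Decidable (Pre_mergeArrays nums1 nums2) := by unfold Pre_mergeArrays; infer_instance

def pvWitness_mergeArrays : List (List Int) × List (List Int) :=
  ([[1, 2], [2, 3]], [[1, 4], [3, 5]])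

def Spec_mergeArrays (nums1 : List (List Int)) (nums2 : List (List Int)) (out : List (List Int)) : Prop := out = mergeArrays_alt nums1 nums2
instance (nums1 : List (List Int)) (nums2 : List (List Int)) (out : List (List Int)) : Decidable (Spec_mergeArrays nums1 nums2 out) := by unfold Spec_mergeArrays; infer_instance

-- ===== CLAIM (what is proved, stated in full; the proofs are below) =====
def Claim_equal_mergeArrays : Prop := ∀ (nums1 : List (List Int)) (nums2 : List (List Int)), Dom_mergeArrays nums1 nums2 → Pre_mergeArrays nums1 nums2 → Spec_mergeArrays nums1 nums2 (mergeArrays nums1 nums2)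

-- ===== LEMMAS AND PROOFS =====

-- A's drain loops are a left fold of the collapse-or-append step.
theorem drainA_eq_foldl (a : List (List Int)) (res : List (List Int)) :
    pvDrainA res a = List.foldl pvPushA res a := by
  induction a generalizing res with
  | nil => rfl
  | cons x t ih => simp [pvDrainA, ih]

-- A's fused main loop equals folding the collapse step over B's plain merge stream.
theorem mergeLoopA_eq_foldl_mergeB (a b res : List (List Int)) :
    pvMergeLoopA res a b = List.foldl pvPushA res (pvMergeB a b) := by
  induction a generalizing b res with
  | nil =>
      cases b with
      | nil => simp [pvMergeLoopA, pvMergeB, drainA_eq_foldl]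
      | cons y b' => simp [pvMergeLoopA, pvMergeB, drainA_eq_foldl]
  | cons x a' ih =>
      induction b generalizing res with
      | nil => simp [pvMergeLoopA, pvMergeB, drainA_eq_foldl]
      | cons y b' ihb =>
          simp only [pvMergeLoopA, pvMergeB]
          split
          · simp [ih, List.foldl]
          · simp [ihb, List.foldl]

theorem mem_mergeB (a b : List (List Int)) (x : List Int) (hx : x ∈ pvMergeB a b) :
    x ∈ a ∨ x ∈ b := by
  induction a generalizing b with
  | nil => right; simpa [pvMergeB] using hx
  | cons z a' ih =>
      induction b with
      | nil => left; simpa [pvMergeB] using hx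
      | cons y b' ihb =>
          simp only [pvMergeB] at hx
          split at hx
          · rcases List.mem_cons.mp hx with h | h
            · left; simp [h]
            · rcases ih _ h with h1 | h1
              · left; simp [h1]
              · right; exact h1
          · rcases List.mem_cons.mp hx with h | h
            · right; simp [h]
            · rcases ihb h with h1 | h1
              · exact Or.inl h1
              · right; simp [h1]

-- KEY: folding A's collapse step over a stream whose rows all have length ≥ 2, starting with an
-- open last row e, produces e's run collapsed followed by B's run-grouping of the remainder.
theorem foldl_pushA_eq_collapse (xs : List (List Int)) (h2 : ∀ x ∈ xs, 2 ≤ x.length)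
    (e : List Int) (he : 2 ≤ e.length) (res : List (List Int)) :
    List.foldl pvPushA (res ++ [e]) xs =
      res ++ (([e.getD 0 0, (pvRunB (e.getD 0 0) (e.getD 1 0) xs).1] ++ e.drop 2)
        :: pvCollapseB (pvRunB (e.getD 0 0) (e.getD 1 0) xs).2) := by
  induction xs generalizing e res with
  | nil =>
      obtain ⟨p, q, t, rfl⟩ : ∃ p q t, e = p :: q :: t := by
        match e, he with
        | p :: q :: t, _ => exact ⟨p, q, t, rfl⟩
      simp [pvRunB, pvCollapseB]
  | cons m t ih =>
      obtain ⟨p, q, t', rfl⟩ : ∃ p q t', e = p :: q :: t' := by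
        match e, he with
        | p :: q :: t', _ => exact ⟨p, q, t', rfl⟩
      have hm := h2 m (by simp)
      obtain ⟨mp, mq, mt, rfl⟩ : ∃ mp mq mt, m = mp :: mq :: mt := by
        match m, hm with
        | mp :: mq :: mt, _ => exact ⟨mp, mq, mt, rfl⟩
      have ht : ∀ x ∈ t, 2 ≤ x.length := fun x hx => h2 x (by simp [hx])
      by_cases hid : mp = p
      · have hpush : pvPushA (res ++ [p :: q :: t']) (mp :: mq :: mt)
            = res ++ [p :: (q + mq) :: t'] := by
          simp [pvPushA, hid, pvAddSnd]
        simp only [List.foldl_cons, hpush]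
        have := ih ht (p :: (q + mq) :: t') (by simp) res
        simpa [pvRunB, hid] using this
      · have hpush : pvPushA (res ++ [p :: q :: t']) (mp :: mq :: mt)
            = (res ++ [p :: q :: t']) ++ [mp :: mq :: mt] := by
          simp [pvPushA, Ne.symm hid]
        simp only [List.foldl_cons, hpush]
        have := ih ht (mp :: mq :: mt) (by simp) (res ++ [p :: q :: t'])
        rw [this]
        simp [pvRunB, hid, pvCollapseB]

-- ===== VERDICT (by name: the statement is the Claim_ definition above) =====
theorem mergeArrays_spec : Claim_equal_mergeArrays := by
  intro nums1 nums2 _ hpre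
  unfold Spec_mergeArrays mergeArrays mergeArrays_alt
  rw [mergeLoopA_eq_foldl_mergeB]
  have h2 : ∀ x ∈ pvMergeB nums1 nums2, 2 ≤ x.length := by
    intro x hx
    rcases mem_mergeB _ _ _ hx with h | h
    · exact hpre.1 x h
    · exact hpre.2 x h
  cases hmb : pvMergeB nums1 nums2 with
  | nil => simp [pvCollapseB]
  | cons e t =>
      rw [hmb] at h2
      have he : 2 ≤ e.length := h2 e (by simp)
      have ht : ∀ x ∈ t, 2 ≤ x.length := fun x hx => h2 x (by simp [hx])
      have hfirst : pvPushA [] e = [] ++ [e] := by simp [pvPushA]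
      simp only [List.foldl_cons, hfirst]
      rw [foldl_pushA_eq_collapse t ht e he []]
      simp [pvCollapseB]
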